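-- pv_equiv track=rewrite | github.com/slisznia/drift | lang/mir_to_llvm.py | _pointer_size_bits
-- ===== SOURCE A (Python) =====
-- def _pointer_size_bits(data_layout: str) -> int:
--     """
--     Derive pointer size from the target data layout string (e.g., ...-p272:64:64-...).
--     Falls back to 64 if no pointer fragment is found.
--     """
--     last_bits = None
--     for frag in data_layout.split("-"):
--         if frag.startswith("p"):
--             parts = frag.split(":")
--             if len(parts) >= 2 and parts[1].isdigit():
--                 last_bits = int(parts[1])
--     return last_bits or 64
-- ===== SOURCE B (Python) =====
-- def _pointer_size_bits(data_layout: str) -> int: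
--     """Single character-level scan: no tokenization. Walk fragment starts directly
--     in the string; at a fragment starting with 'p', locate the first ':' within the
--     fragment, take the maximal digit run after it, and accept it as the bit count
--     when it is non-empty and ends at ':', '-' or the end of the string."""
--     bits = 64
--     i = 0
--     n = len(data_layout)
--     while i < n:
--         if data_layout[i] == "p":
--             j = i + 1
--             while j < n and data_layout[j] != ":" and data_layout[j] != "-":
--                 j += 1
--             if j < n and data_layout[j] == ":":
--                 k = j + 1
--                 while k < n and "0" <= data_layout[k] <= "9":
--                     k += 1
--                 if k > j + 1 and (k == n or data_layout[k] == ":" or data_layout[k] == "-"):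
--                     bits = int(data_layout[j + 1 : k])
--         while i < n and data_layout[i] != "-":
--             i += 1
--         i += 1
--     return bits or 64
-- ===== Notes on version B (the rewrite author's own statement) =====
-- stated objective: alternative
-- what changed: Replaces A's split('-')/split(':')/isdigit tokenization pipeline with a direct character-level index scan: one walk over the string that jumps between fragment starts, locates the ':' inside a 'p' fragment and validates the maximal digit run in place, never materializing any token lists.
import Mathlib
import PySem

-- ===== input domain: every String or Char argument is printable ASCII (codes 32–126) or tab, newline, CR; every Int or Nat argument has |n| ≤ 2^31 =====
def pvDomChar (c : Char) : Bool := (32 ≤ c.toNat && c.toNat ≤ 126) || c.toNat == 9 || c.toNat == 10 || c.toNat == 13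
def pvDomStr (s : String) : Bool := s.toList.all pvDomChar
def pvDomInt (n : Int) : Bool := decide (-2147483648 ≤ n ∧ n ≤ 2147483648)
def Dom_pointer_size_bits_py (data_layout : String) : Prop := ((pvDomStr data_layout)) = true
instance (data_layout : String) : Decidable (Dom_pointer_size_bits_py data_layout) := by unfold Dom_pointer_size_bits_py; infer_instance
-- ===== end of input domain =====

-- B replaces A's split('-')/split(':')/isdigit tokenization with a direct character-level
-- scan of the string that never builds token lists (objective: alternative).

-- ===== PORT A =====
-- one loop step of A: overwrite last_bits when the fragment is a valid pointer fragment
-- (parts[1] is safe: Python indexes it only after len(parts) >= 2, mirrored by getD after the length test)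
def pvStepA (acc : Option Int) (frag : String) : Option Int :=
  if PySem.Str.startswith frag "p" then
    let parts := PySem.Str.split? frag ":" |>.getD []
    if 2 ≤ parts.length ∧ PySem.Str.strIsdigit (parts.getD 1 "") then
      some ((PySem.Int.ofStr? (parts.getD 1 "")).getD 0)
    else acc
  else acc

def pointer_size_bits_py (data_layout : String) : Int :=
  match (PySem.Str.split? data_layout "-" |>.getD []).foldl pvStepA none with
  | some n => if n = 0 then 64 else n   -- `last_bits or 64`
  | none => 64

-- ===== PORT B =====
-- the test `"0" <= c <= "9"`
def pvIsDig (c : Char) : Bool := decide ('0' ≤ c) && decide (c ≤ '9')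

-- the `while i < n and data_layout[i] != "-": i += 1` / `i += 1` advance to the next fragment start
def pvSkipFrag : List Char → List Char
  | [] => []
  | c :: rest => if c = '-' then rest else pvSkipFrag rest

-- the `j` loop plus the `j < n and data_layout[j] == ":"` test: the chars after the first ':'
-- reached before any '-'/end of string, none if there is no such ':'
def pvAfterColon : List Char → Option (List Char)
  | [] => none
  | c :: rest => if c = ':' then some rest else if c = '-' then none else pvAfterColon rest

-- the `k` loop: split off the maximal digit run (the slice data_layout[j+1:k]) and what follows
def pvDigitRun : List Char → List Char × List Char
  | [] => ([], [])
  | c :: rest =>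
    if pvIsDig c then
      let (ds, r) := pvDigitRun rest
      (c :: ds, r)
    else ([], c :: rest)

-- termination helper cited by pvMain's decreasing_by
theorem pvSkipFrag_length_le (l : List Char) : (pvSkipFrag l).length ≤ l.length := by
  induction l with
  | nil => simp [pvSkipFrag]
  | cons c rest ih => simp only [pvSkipFrag]; split <;> simp <;> omega

-- the outer `while i < n` loop: at each iteration the cursor is at a fragment start
def pvMain : List Char → Int → Int
  | [], bits => bits
  | c :: cs, bits =>
    let bits' :=
      if c = 'p' then
        match pvAfterColon cs with
        | some after =>
          match pvDigitRun after with
          | (ds, rest) =>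
            if ds ≠ [] ∧ (rest = [] ∨ rest.head? = some ':' ∨ rest.head? = some '-') then
              (PySem.Int.ofChars? ds).getD 0
            else bits
        | none => bits
      else bits
    pvMain (pvSkipFrag (c :: cs)) bits'
termination_by l _ => l.length
decreasing_by
  simp only [pvSkipFrag]
  split
  · simp
  · have := pvSkipFrag_length_le cs; simp; omega

def pointer_size_bits_py_alt (data_layout : String) : Int :=
  let bits := pvMain data_layout.toList 64
  if bits = 0 then 64 else bits   -- `bits or 64`

-- ===== PRECONDITION & SPEC =====
def Spec_pointer_size_bits_py (data_layout : String) (out : Int) : Prop := out = pointer_size_bits_py_alt data_layout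
instance (data_layout : String) (out : Int) : Decidable (Spec_pointer_size_bits_py data_layout out) := by unfold Spec_pointer_size_bits_py; infer_instance

-- ===== CLAIM (what is proved, stated in full; the proofs are below) =====
def Claim_equal_pointer_size_bits_py : Prop := ∀ (data_layout : String), Dom_pointer_size_bits_py data_layout → Spec_pointer_size_bits_py data_layout (pointer_size_bits_py data_layout)

-- ===== LEMMAS AND PROOFS =====

-- structural single-character splitter: what Python's s.split(sep) computes for a 1-char sep
def pySplit (sep : Char) : List Char → List (List Char)
  | [] => [[]]
  | c :: rest =>
    if c = sep then [] :: pySplit sep rest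
    else
      match pySplit sep rest with
      | f :: fs => (c :: f) :: fs
      | [] => [[c]]

theorem pySplit_ne_nil (sep : Char) (l : List Char) : pySplit sep l ≠ [] := by
  cases l with
  | nil => simp [pySplit]
  | cons c rest => simp only [pySplit]; split; · simp
                   · split <;> simp

theorem splitOn_go_eq (sep : Char) (cs : List Char) : ∀ (fuel : Nat) (cur : List Char)
    (acc : List (List Char)), cs.length ≤ fuel →
    PySem.Chars.splitOn.go [sep] fuel cs cur acc =
      acc.reverse ++ (match pySplit sep cs with
        | f :: fs => (cur.reverse ++ f) :: fs
        | [] => []) := by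
  induction cs with
  | nil =>
    intro fuel cur acc _
    cases fuel with
    | zero => rw [PySem.Chars.splitOn.go]; simp [pySplit]
    | succ f => rw [PySem.Chars.splitOn.go]; · simp [pySplit]
                · omega
  | cons c rest ih =>
    intro fuel cur acc h
    cases fuel with
    | zero => simp at h
    | succ f =>
      rw [PySem.Chars.splitOn.go]
      by_cases hc : c = sep
      · subst hc
        have hp : [c].isPrefixOf (c :: rest) = true := by simp [List.isPrefixOf]
        simp only [hp, if_true, List.length_cons, List.length_nil, List.drop_succ_cons, List.drop_zero]
        rw [ih f [] (cur.reverse :: acc) (by simp at h; omega)]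
        simp [pySplit]
        rcases hsp : pySplit c rest with _ | ⟨g, gs⟩
        · exact absurd hsp (pySplit_ne_nil c rest)
        · simp
      · have hp : [sep].isPrefixOf (c :: rest) = false := by
          simp [List.isPrefixOf]; exact fun hh => absurd hh.symm hc
        simp only [hp, Bool.false_eq_true, if_false]
        rw [ih f (c :: cur) acc (by simp at h; omega)]
        simp only [pySplit, hc, if_false]
        rcases hsp : pySplit sep rest with _ | ⟨g, gs⟩
        · exact absurd hsp (pySplit_ne_nil sep rest)
        · simp

theorem splitOn_eq (sep : Char) (cs : List Char) :
    PySem.Chars.splitOn cs [sep] = pySplit sep cs := by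
  unfold PySem.Chars.splitOn
  rw [splitOn_go_eq sep cs (cs.length+1) [] [] (by omega)]
  rcases hsp : pySplit sep cs with _ | ⟨g, gs⟩
  · exact absurd hsp (pySplit_ne_nil sep cs)
  · simp

-- char-level restatement of A's loop step
def pvStepC (acc : Option Int) (frag : List Char) : Option Int :=
  if PySem.Chars.startswith frag ['p'] then
    let parts := pySplit ':' frag
    if 2 ≤ parts.length ∧ PySem.Chars.strIsdigit (parts.getD 1 []) then
      some ((PySem.Int.ofChars? (parts.getD 1 [])).getD 0)
    else acc
  else acc

-- A's accumulator (last_bits) as B sees it: None is represented by the untouched 64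
def pvRepr : Option Int → Int
  | none => 64
  | some n => n

theorem dropWhile_head_false {α : Type} (p : α → Bool) (l : List α) (x : α) (r : List α)
    (h : l.dropWhile p = x :: r) : p x = false := by
  induction l with
  | nil => simp at h
  | cons c cs ih =>
    rw [List.dropWhile_cons] at h
    by_cases hc : p c
    · exact ih (by simpa [hc] using h)
    · simp [hc] at h; rw [← h.1]; simpa using hc

theorem pvStepA_eq_stepC (acc : Option Int) (l : List Char) :
    pvStepA acc (String.ofList l) = pvStepC acc l := by
  have h1 : PySem.Str.startswith (String.ofList l) "p" = PySem.Chars.startswith l ['p'] := by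
    simp [PySem.Str.startswith_eq]
  have h2 : PySem.Str.split? (String.ofList l) ":" = some ((pySplit ':' l).map String.ofList) := by
    unfold PySem.Str.split?
    simp [PySem.Chars.split?, splitOn_eq]
  have h4 : ((pySplit ':' l).map String.ofList).getD 1 "" =
      String.ofList ((pySplit ':' l).getD 1 []) := by
    have := List.getD_map (pySplit ':' l) [] (n := 1) String.ofList
    simpa using this
  have h5 : PySem.Str.strIsdigit (String.ofList ((pySplit ':' l).getD 1 [])) =
      PySem.Chars.strIsdigit ((pySplit ':' l).getD 1 []) := by
    simp [PySem.Str.strIsdigit_eq]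
  simp only [pvStepA, pvStepC, h1, h2, Option.getD_some, List.length_map, h4, h5,
    PySem.Int.ofStr?_ofList]

theorem pySplit_head_tail (sep : Char) (cs : List Char) :
    pySplit sep cs = cs.takeWhile (· ≠ sep) ::
      (match cs.dropWhile (· ≠ sep) with
        | [] => []
        | _ :: r => pySplit sep r) := by
  induction cs with
  | nil => simp [pySplit]
  | cons c rest ih =>
    by_cases hc : c = sep
    · subst hc; simp [pySplit, List.takeWhile_cons, List.dropWhile_cons]
    · simp only [pySplit, hc, if_false, List.takeWhile_cons, List.dropWhile_cons]
      simp only [hc, decide_eq_true_eq, ne_eq, not_false_iff, decide_true, if_true, ite_true]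
      rw [ih]

theorem pvSkipFrag_eq (cs : List Char) :
    pvSkipFrag cs = (match cs.dropWhile (· ≠ '-') with | [] => [] | _ :: r => r) := by
  induction cs with
  | nil => simp [pvSkipFrag]
  | cons c rest ih =>
    by_cases hc : c = '-'
    · subst hc; simp [pvSkipFrag, List.dropWhile_cons]
    · simp [pvSkipFrag, List.dropWhile_cons, hc, ih]

theorem pvDigitRun_eq (l : List Char) :
    pvDigitRun l = (l.takeWhile pvIsDig, l.dropWhile pvIsDig) := by
  induction l with
  | nil => simp [pvDigitRun]
  | cons c rest ih =>
    by_cases hc : pvIsDig c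
    · simp [pvDigitRun, hc, List.takeWhile_cons, List.dropWhile_cons, ih]
    · simp [pvDigitRun, hc, List.takeWhile_cons, List.dropWhile_cons]

theorem pvAfterColon_none (u t : List Char) (hu : ':' ∉ u) (hd : '-' ∉ u)
    (ht : t = [] ∨ t.head? = some '-') : pvAfterColon (u ++ t) = none := by
  induction u with
  | nil =>
    rcases ht with h | h
    · simp [h, pvAfterColon]
    · cases t with
      | nil => simp [pvAfterColon]
      | cons x r => simp at h; subst h; simp [pvAfterColon]
  | cons c rest ih =>
    simp at hu hd
    simp [pvAfterColon, Ne.symm hu.1, Ne.symm hd.1, ih hu.2 hd.2]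

theorem pvAfterColon_some (a z : List Char) (ha : ':' ∉ a) (hd : '-' ∉ a) :
    pvAfterColon (a ++ ':' :: z) = some z := by
  induction a with
  | nil => simp [pvAfterColon]
  | cons c rest ih =>
    simp at ha hd
    simp [pvAfterColon, Ne.symm ha.1, Ne.symm hd.1, ih ha.2 hd.2]

theorem pvIsDig_colon : pvIsDig ':' = false := by decide

theorem pvIsDig_dash : pvIsDig '-' = false := by decide

theorem takeWhile_ne_colon_of_all_dig (e : List Char) (h : ∀ x ∈ e, pvIsDig x = true) :
    e.takeWhile (fun x => x ≠ ':') = e := by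
  apply List.takeWhile_eq_self_iff.mpr
  intro x hx
  have := h x hx
  simp only [ne_eq, decide_eq_true_eq]
  intro hc; subst hc; rw [pvIsDig_colon] at this; exact absurd this (by simp)

-- per-fragment core: pvMain's loop body computes A's step on the first '-'-fragment
theorem pvFrag_eq (c : Char) (cs : List Char) (acc : Option Int) :
    (if c = 'p' then
        match pvAfterColon cs with
        | some after =>
          match pvDigitRun after with
          | (ds, rest) =>
            if ds ≠ [] ∧ (rest = [] ∨ rest.head? = some ':' ∨ rest.head? = some '-') then
              (PySem.Int.ofChars? ds).getD 0
            else pvRepr acc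
        | none => pvRepr acc
      else pvRepr acc) =
      pvRepr (pvStepC acc ((c :: cs).takeWhile (fun x => x ≠ '-'))) := by
  have hdd : PySem.Chars.isdigit = pvIsDig := rfl
  by_cases hp : c = 'p'
  case neg =>
    simp only [hp, if_false]
    rw [List.takeWhile_cons]
    by_cases hc : c = '-'
    · simp only [hc]
      simp [pvStepC, PySem.Chars.startswith]
    · simp only [ne_eq, hc, not_false_iff, decide_true, if_true]
      simp [pvStepC, PySem.Chars.startswith, List.isPrefixOf, Ne.symm hp]
  case pos =>
    subst hp
    rw [List.takeWhile_cons]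
    simp only [show (decide ¬('p' = '-')) = true by decide, if_true]
    set ft := cs.takeWhile (fun x => x ≠ '-') with hft_def
    set t := cs.dropWhile (fun x => x ≠ '-') with ht_def
    have hcs : ft ++ t = cs := List.takeWhile_append_dropWhile
    have hft : ∀ x ∈ ft, x ≠ '-' := by
      intro x hx
      have := List.mem_takeWhile_imp hx
      simpa using this
    have ht : t = [] ∨ t.head? = some '-' := by
      cases ht' : t with
      | nil => exact Or.inl rfl
      | cons x r =>
        have := dropWhile_head_false _ cs x r (by rw [← ht_def]; exact ht')
        right; simp at this; simp [this]
    clear_value ft t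
    have hsw : PySem.Chars.startswith ('p' :: ft) ['p'] = true := by
      simp [PySem.Chars.startswith, List.isPrefixOf]
    simp only [pvStepC, hsw, if_true]
    rw [pySplit_head_tail ':' ('p' :: ft)]
    rw [List.takeWhile_cons, List.dropWhile_cons]
    simp only [show (decide ¬('p' = ':')) = true by decide, if_true,
      show (decide ('p' = ':')) = false by decide, Bool.false_eq_true]
    cases hdw : ft.dropWhile (fun x => x ≠ ':') with
    | nil =>
      -- no ':' in the fragment: A sees a single part, B's colon scan fails
      have hnc : ':' ∉ ft := by
        intro hmem
        have := List.dropWhile_eq_nil_iff.mp hdw ':' hmem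
        simp at this
      have hacn : pvAfterColon cs = none := by
        rw [← hcs]
        exact pvAfterColon_none ft t hnc (fun hm => (hft '-' hm) rfl) ht
      rw [hacn]
      simp [pvRepr]
    | cons x b =>
      have hx : x = ':' := by
        have := dropWhile_head_false _ ft x b hdw
        simpa using this
      subst hx
      set a := ft.takeWhile (fun x => x ≠ ':') with ha_def
      have hdec : a ++ ':' :: b = ft := by rw [ha_def, ← hdw]; exact List.takeWhile_append_dropWhile
      have hmem_ft : ∀ x ∈ a, x ∈ ft := by intro x hx; rw [← hdec]; simp [hx]
      have hmem_b : ∀ x ∈ b, x ∈ ft := by intro x hx; rw [← hdec]; simp [hx]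
      have hna : ':' ∉ a := by
        intro hm; have := List.mem_takeWhile_imp hm; simp at this
      have hda : '-' ∉ a := fun hm => (hft '-' (hmem_ft '-' hm)) rfl
      have hdb : '-' ∉ b := fun hm => (hft '-' (hmem_b '-' hm)) rfl
      have hac : pvAfterColon cs = some (b ++ t) := by
        rw [← hcs, ← hdec]
        rw [List.append_assoc, List.cons_append]
        exact pvAfterColon_some a (b ++ t) hna hda
      rw [hac]
      simp only [pvDigitRun_eq]
      -- t contributes nothing to the digit run
      have htake_t : t.takeWhile pvIsDig = [] := by
        rcases ht with h | h
        · simp [h]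
        · cases t with
          | nil => simp
          | cons y r => simp at h; subst h; simp [List.takeWhile_cons, pvIsDig_dash]
      have hdrop_t : t.dropWhile pvIsDig = t := by
        rcases ht with h | h
        · simp [h]
        · cases t with
          | nil => simp
          | cons y r => simp at h; subst h; simp [List.dropWhile_cons, pvIsDig_dash]
      -- parts.getD 1 [] is the second ':'-part of the fragment
      have hgd : (('p' :: a) :: pySplit ':' b).getD 1 [] = b.takeWhile (fun x => x ≠ ':') := by
        rw [pySplit_head_tail ':' b]
        rfl
      have hlen : 2 ≤ (('p' :: a) :: pySplit ':' b).length := by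
        rw [pySplit_head_tail ':' b]; simp
      simp only [hgd, hlen, true_and]
      -- split b at its maximal digit prefix
      set e := b.takeWhile pvIsDig with he_def
      set r0 := b.dropWhile pvIsDig with hr0_def
      have hb : e ++ r0 = b := List.takeWhile_append_dropWhile
      have he_dig : ∀ x ∈ e, pvIsDig x = true := fun x hx => List.mem_takeWhile_imp hx
      have hds : (b ++ t).takeWhile pvIsDig = e := by
        rw [List.takeWhile_append, htake_t]
        split
        · next hfull =>
          rw [List.append_nil, he_def]
          exact ((List.takeWhile_prefix _).eq_of_length hfull).symm
        · rfl
      have hrest : (b ++ t).dropWhile pvIsDig = r0 ++ t := by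
        rw [List.dropWhile_append, hdrop_t]
        split
        · next hemp =>
          rw [hr0_def] at *
          simp only [List.isEmpty_iff] at hemp
          rw [hemp]; rfl
        · rfl
      clear_value e r0
      rw [hds, hrest]
      have hstr : ∀ u : List Char, (∀ x ∈ u, pvIsDig x = true) →
          PySem.Chars.strIsdigit u = !u.isEmpty := by
        intro u hu
        simp only [PySem.Chars.strIsdigit, hdd, List.all_eq_true, Bool.and_eq_true,
          Bool.not_eq_true']
        cases u with
        | nil => simp
        | cons d ds' =>
          have h1 := hu d (by simp)
          have h2 : ∀ x ∈ ds', pvIsDig x = true := fun x hx => hu x (by simp [hx])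
          simp [h1]
          exact h2
      cases hr0c : r0 with
      | nil =>
        have hbe : e = b := by rw [← hb, hr0c, List.append_nil]
        have hu : b.takeWhile (fun x => x ≠ ':') = e := by
          rw [← hbe]; exact takeWhile_ne_colon_of_all_dig e he_dig
        rw [hu, hstr e he_dig]
        have hc2 : (([] : List Char) ++ t = [] ∨ (([] : List Char) ++ t).head? = some ':' ∨ (([] : List Char) ++ t).head? = some '-') := by
          rcases ht with h | h
          · exact Or.inl (by simp [h])
          · exact Or.inr (Or.inr (by simpa using h))
        simp only [hc2, and_true]
        cases he : e with
        | nil => simp [pvRepr]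
        | cons d ds' => simp [pvRepr]
      | cons x r0' =>
        have hx : pvIsDig x = false := by
          have := dropWhile_head_false pvIsDig b x r0' (by rw [← hr0_def]; exact hr0c)
          exact this
        have hxb : x ∈ b := by rw [← hb, hr0c]; simp
        have hxd : x ≠ '-' := fun hh => (hft '-' (hmem_b '-' (hh ▸ hxb))) rfl
        have hhd : ((x :: r0') ++ t).head? = some x := by simp
        have he_nocolon : e.takeWhile (fun x => x ≠ ':') = e := takeWhile_ne_colon_of_all_dig e he_dig
        by_cases hxc : x = ':'
        · subst hxc
          have hu : b.takeWhile (fun x => x ≠ ':') = e := by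
            rw [← hb, hr0c, List.takeWhile_append]
            rw [he_nocolon]
            simp
          rw [hu, hstr e he_dig]
          simp only [hhd, List.cons_append]
          cases he : e with
          | nil => simp [pvRepr]
          | cons d ds' => simp [pvRepr]
        · -- the digit run stops at a non-':' non-'-' char: both sides reject
          have hu : b.takeWhile (fun x => x ≠ ':') =
              e ++ x :: r0'.takeWhile (fun x => x ≠ ':') := by
            rw [← hb, hr0c, List.takeWhile_append, he_nocolon]
            simp [List.takeWhile_cons, hxc]
          have hfalse : PySem.Chars.strIsdigit (b.takeWhile (fun x => x ≠ ':')) = false := by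
            rw [hu]
            simp only [PySem.Chars.strIsdigit, hdd, Bool.and_eq_false_iff, List.all_eq_false]
            exact Or.inr ⟨x, by simp, by simp [hx]⟩
          rw [hfalse]
          simp [pvRepr, hxc, hxd]

theorem pvMain_eq_fold (cs : List Char) (acc : Option Int) :
    pvMain cs (pvRepr acc) = pvRepr ((pySplit '-' cs).foldl pvStepC acc) := by
  have H : ∀ n (cs : List Char) (acc : Option Int), cs.length ≤ n →
      pvMain cs (pvRepr acc) = pvRepr ((pySplit '-' cs).foldl pvStepC acc) := by
    intro n
    induction n with
    | zero =>
      intro cs acc h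
      have : cs = [] := by cases cs <;> simp_all
      subst this
      simp [pvMain, pySplit, pvStepC, PySem.Chars.startswith, List.isPrefixOf]
    | succ n ih =>
      intro cs acc h
      cases cs with
      | nil => simp [pvMain, pySplit, pvStepC, PySem.Chars.startswith, List.isPrefixOf]
      | cons c cs' =>
        rw [pvMain]
        rw [pvFrag_eq c cs' acc]
        rw [pySplit_head_tail '-' (c :: cs')]
        rw [List.foldl_cons]
        simp only [pvSkipFrag]
        by_cases hc : c = '-'
        · subst hc
          simp only [if_true]
          rw [List.takeWhile_cons, List.dropWhile_cons]
          simp only [show (decide ¬('-' = '-')) = false by decide, Bool.false_eq_true, if_false,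
            show (decide ('-' = '-')) = true by decide, if_true]
          rw [ih cs' _ (by simpa using h)]
        · simp only [hc, if_false]
          rw [List.takeWhile_cons, List.dropWhile_cons]
          simp only [ne_eq, hc, not_false_iff, decide_true, if_true]
          have hskip : pvSkipFrag cs' =
              (match cs'.dropWhile (fun x => x ≠ '-') with | [] => [] | _ :: r => r) :=
            pvSkipFrag_eq cs'
          rw [hskip]
          cases hdw : cs'.dropWhile (fun x => x ≠ '-') with
          | nil =>
            simp [pvMain]
          | cons y r =>
            have hr : r.length ≤ n := by
              have h1 := List.length_dropWhile_le (fun x => decide (x ≠ '-')) cs'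
              rw [hdw] at h1
              simp at h1 h
              omega
            rw [ih r _ hr]
  exact H cs.length cs acc le_rfl


-- ===== VERDICT (by name: the statement is the Claim_ definition above) =====
theorem pointer_size_bits_py_spec : Claim_equal_pointer_size_bits_py := by
  intro s _
  unfold Spec_pointer_size_bits_py pointer_size_bits_py pointer_size_bits_py_alt
  have h2 : (PySem.Str.split? s "-" |>.getD []) = (pySplit '-' s.toList).map String.ofList := by
    show (PySem.Str.split? s "-").getD [] = _
    unfold PySem.Str.split?
    simp [PySem.Chars.split?, splitOn_eq]
  rw [h2, List.foldl_map]
  have h3 : (fun (acc : Option Int) (l : List Char) => pvStepA acc (String.ofList l)) = pvStepC := by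
    funext acc l; exact pvStepA_eq_stepC acc l
  rw [h3]
  have h4 := pvMain_eq_fold s.toList none
  simp only [pvRepr] at h4
  rw [h4]
  cases (pySplit '-' s.toList).foldl pvStepC none with
  | none => simp [pvRepr]
  | some n => simp [pvRepr]
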